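-- pv_equiv track=rewrite | github.com/Jialin-Ye/Mapping-the-spontaneous-behavior-patterns-in-male-and-female-mice | Figure5_spatial_perference/Figure5B-identify_distinct_density_boundary.py | find_cross_point
-- ===== SOURCE A (Python) =====
-- def find_cross_point(height,curve,x_smooth):
--     start_point = 0
--     end_point = 0
--     for i in range(1,len(curve)):
--         x1 = curve[i-1]
--         x2 = curve[i]
--
--         if (x1 <= height) & (height <= x2):
--             start_point = i
--         elif (x2 <= height) & (height <= x1):
--             end_point = i
--     return(start_point,end_point)
-- ===== SOURCE B (Python) =====
-- def find_cross_point(height, curve, x_smooth):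
--     # backward scan with early exit: first up/down crossing found from the end
--     # is the last one a forward scan would keep
--     start_point = 0
--     end_point = 0
--     for i in range(len(curve) - 1, 0, -1):
--         x1 = curve[i - 1]
--         x2 = curve[i]
--         up = x1 <= height <= x2
--         if start_point == 0 and up:
--             start_point = i
--         elif end_point == 0 and (x2 <= height <= x1) and not up:
--             end_point = i
--         if start_point != 0 and end_point != 0:
--             break
--     return (start_point, end_point)
-- ===== Notes on version B (the rewrite author's own statement) =====
-- stated objective: alternative
-- what changed: B scans the curve backward from the last index and stops as soon as both the last up-crossing and the last down-crossing are found (first hit in backward order), instead of A's full forward scan that keeps overwriting them.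
import Mathlib
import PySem

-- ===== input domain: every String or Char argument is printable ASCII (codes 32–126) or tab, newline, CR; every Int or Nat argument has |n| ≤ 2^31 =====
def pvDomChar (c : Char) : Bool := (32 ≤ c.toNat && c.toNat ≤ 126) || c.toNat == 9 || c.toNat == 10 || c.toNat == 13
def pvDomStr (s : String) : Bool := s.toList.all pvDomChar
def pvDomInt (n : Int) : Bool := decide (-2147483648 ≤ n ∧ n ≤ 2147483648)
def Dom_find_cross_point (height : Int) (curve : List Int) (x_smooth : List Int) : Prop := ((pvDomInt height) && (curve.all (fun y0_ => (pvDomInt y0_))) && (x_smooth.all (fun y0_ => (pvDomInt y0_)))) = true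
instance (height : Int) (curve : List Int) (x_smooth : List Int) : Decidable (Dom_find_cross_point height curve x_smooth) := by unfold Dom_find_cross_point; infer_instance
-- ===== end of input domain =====

-- B scans backward from the last index with early exit instead of A's full forward scan; same values proved equal.

-- ===== PORT A =====
-- indices i-1, i always lie in range, so pyGetD with default 0 is exact here
def find_cross_point (height : Int) (curve : List Int) (x_smooth : List Int) : Int × Int :=
  (PySem.List.pyRange 1 (curve.length : Int) 1).foldl
    (fun (st : Int × Int) (i : Int) =>
      let x1 := PySem.List.pyGetD curve (i - 1) 0
      let x2 := PySem.List.pyGetD curve i 0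
      if x1 ≤ height ∧ height ≤ x2 then (i, st.2)
      else if x2 ≤ height ∧ height ≤ x1 then (st.1, i)
      else st)
    (0, 0)

-- ===== PORT B =====
-- the backward loop with its break, as structural recursion over the countdown range
def fcpLoop (height : Int) (curve : List Int) : List Int → Int × Int → Int × Int
  | [], st => st
  | i :: rest, st =>
    let x1 := PySem.List.pyGetD curve (i - 1) 0
    let x2 := PySem.List.pyGetD curve i 0
    let up : Bool := decide (x1 ≤ height ∧ height ≤ x2)
    let st' :=
      if st.1 = 0 ∧ up then (i, st.2)
      else if st.2 = 0 ∧ (x2 ≤ height ∧ height ≤ x1) ∧ ¬(up = true) then (st.1, i)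
      else st
    if st'.1 ≠ 0 ∧ st'.2 ≠ 0 then st' else fcpLoop height curve rest st'

def find_cross_point_alt (height : Int) (curve : List Int) (x_smooth : List Int) : Int × Int :=
  fcpLoop height curve (PySem.List.pyRange ((curve.length : Int) - 1) 0 (-1)) (0, 0)

-- ===== PRECONDITION & SPEC =====
def Spec_find_cross_point (height : Int) (curve : List Int) (x_smooth : List Int) (out : Int × Int) : Prop := out = find_cross_point_alt height curve x_smooth
instance (height : Int) (curve : List Int) (x_smooth : List Int) (out : Int × Int) : Decidable (Spec_find_cross_point height curve x_smooth out) := by unfold Spec_find_cross_point; infer_instance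

-- ===== CLAIM (what is proved, stated in full; the proofs are below) =====
def Claim_equal_find_cross_point : Prop := ∀ (height : Int) (curve : List Int) (x_smooth : List Int), Dom_find_cross_point height curve x_smooth → Spec_find_cross_point height curve x_smooth (find_cross_point height curve x_smooth)

-- ===== LEMMAS AND PROOFS =====

-- Bool predicates for "up-crossing at i" and "down-crossing (and not up) at i"
def upAt (height : Int) (curve : List Int) (i : Int) : Bool :=
  decide (PySem.List.pyGetD curve (i - 1) 0 ≤ height ∧ height ≤ PySem.List.pyGetD curve i 0)
def dnAt (height : Int) (curve : List Int) (i : Int) : Bool :=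
  decide (PySem.List.pyGetD curve i 0 ≤ height ∧ height ≤ PySem.List.pyGetD curve (i - 1) 0) && !(upAt height curve i)

-- A's fold splits componentwise into two "keep the last index satisfying p" folds
theorem A_fold_split (height : Int) (curve : List Int) (L : List Int) (s e : Int) :
    L.foldl (fun (st : Int × Int) (i : Int) =>
      let x1 := PySem.List.pyGetD curve (i - 1) 0
      let x2 := PySem.List.pyGetD curve i 0
      if x1 ≤ height ∧ height ≤ x2 then (i, st.2)
      else if x2 ≤ height ∧ height ≤ x1 then (st.1, i)
      else st) (s, e)
    = (L.foldl (fun a i => if upAt height curve i then i else a) s,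
       L.foldl (fun a i => if dnAt height curve i then i else a) e) := by
  induction L generalizing s e with
  | nil => rfl
  | cons i rest ih =>
    simp only [List.foldl_cons]
    rw [← ih]
    congr 1
    simp only [upAt, dnAt]
    by_cases h1 : PySem.List.pyGetD curve (i - 1) 0 ≤ height ∧ height ≤ PySem.List.pyGetD curve i 0 <;>
      by_cases h2 : PySem.List.pyGetD curve i 0 ≤ height ∧ height ≤ PySem.List.pyGetD curve (i - 1) 0 <;>
      simp [h1, h2]

-- "last index satisfying p" fold = first match on the reversed list
theorem foldl_last_eq_find_reverse (p : Int → Bool) (L : List Int) (d : Int) :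
    L.foldl (fun a i => if p i then i else a) d = (L.reverse.find? p).getD d := by
  induction L generalizing d with
  | nil => rfl
  | cons x t ih =>
    simp only [List.foldl_cons, List.reverse_cons, List.find?_append]
    rw [ih]
    cases h : t.reverse.find? p with
    | some v => simp [h]
    | none => simp [h, List.find?]; by_cases hp : p x <;> simp [hp]

-- B's loop returns (first up-crossing, first down-crossing) of its list, given set flags are kept
theorem fcpLoop_eq_find (height : Int) (curve : List Int) (R : List Int)
    (hR : ∀ i ∈ R, 0 < i) (s e : Int) :
    fcpLoop height curve R (s, e)
      = ((if s = 0 then (R.find? (upAt height curve)).getD 0 else s),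
         (if e = 0 then (R.find? (dnAt height curve)).getD 0 else e)) := by
  induction R generalizing s e with
  | nil => simp [fcpLoop]
  | cons i rest ih =>
    have hi : 0 < i := hR i (List.mem_cons_self ..)
    have hrest : ∀ j ∈ rest, 0 < j := fun j hj => hR j (List.mem_cons_of_mem _ hj)
    have hin : ¬ i = 0 := by omega
    have IH := ih hrest
    by_cases hs : s = 0 <;> by_cases he : e = 0 <;>
      by_cases hu : (PySem.List.pyGetD curve (i - 1) 0 ≤ height ∧ height ≤ PySem.List.pyGetD curve i 0) <;>
      by_cases hd : (PySem.List.pyGetD curve i 0 ≤ height ∧ height ≤ PySem.List.pyGetD curve (i - 1) 0) <;>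
      simp [fcpLoop, upAt, dnAt, List.find?_cons_of_pos, List.find?_cons_of_neg, hs, he, hu, hd, hin, IH]

-- ===== VERDICT (by name: the statement is the Claim_ definition above) =====
theorem find_cross_point_spec : Claim_equal_find_cross_point := by
  intro height curve x_smooth _
  unfold Spec_find_cross_point find_cross_point find_cross_point_alt
  have hrev : PySem.List.pyRange ((curve.length : Int) - 1) 0 (-1)
      = (PySem.List.pyRange 1 (curve.length : Int) 1).reverse := by
    rw [PySem.List.pyRange_neg_one_eq_reverse]
    norm_num
  have hpos : ∀ i ∈ PySem.List.pyRange ((curve.length : Int) - 1) 0 (-1), 0 < i := by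
    intro i hi
    exact (PySem.List.mem_pyRange_neg_one.1 hi).1
  rw [A_fold_split, foldl_last_eq_find_reverse, foldl_last_eq_find_reverse,
      fcpLoop_eq_find height curve _ hpos, hrev]
  simp
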